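-- pv_equiv track=rewrite | github.com/darshanbm26/InfronAI | backend/src/phases/phase6_recommendation_presentation.py | _identify_key_visuals
-- ===== SOURCE A (Python) =====
-- from typing import Dict, Any, Optional, List
--
-- def _identify_key_visuals(visual_components: Dict[str, Any]) -> List[str]:
--     """Identify key visual components for frontend"""
--     priority_visuals = ["cost_summary", "architecture_diagram", "specification_table", "timeline"]
--
--     key_visuals = []
--     for visual in priority_visuals:
--         if visual in visual_components:
--             key_visuals.append(visual)
--
--     # Add any other visuals
--     for visual in visual_components:
--         if visual not in key_visuals:
--             key_visuals.append(visual)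
--
--     return key_visuals[:5]  # Limit to top 5
-- ===== SOURCE B (Python) =====
-- def _identify_key_visuals(visual_components):
--     """Identify key visual components for frontend"""
--     priority_visuals = ["cost_summary", "architecture_diagram", "specification_table", "timeline"]
--     rank = {name: i for i, name in enumerate(priority_visuals)}
--     return sorted(visual_components, key=lambda v: rank.get(v, len(priority_visuals)))[:5]
-- ===== Notes on version B (the rewrite author's own statement) =====
-- stated objective: idiomatic
-- what changed: Replaces A's two scans (priority pass + membership-filtered dict pass appending to a growing list) by one stable sort of the dict keys under a precomputed priority-rank dict with default rank len(priority), then a [:5] cap.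
import Mathlib
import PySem

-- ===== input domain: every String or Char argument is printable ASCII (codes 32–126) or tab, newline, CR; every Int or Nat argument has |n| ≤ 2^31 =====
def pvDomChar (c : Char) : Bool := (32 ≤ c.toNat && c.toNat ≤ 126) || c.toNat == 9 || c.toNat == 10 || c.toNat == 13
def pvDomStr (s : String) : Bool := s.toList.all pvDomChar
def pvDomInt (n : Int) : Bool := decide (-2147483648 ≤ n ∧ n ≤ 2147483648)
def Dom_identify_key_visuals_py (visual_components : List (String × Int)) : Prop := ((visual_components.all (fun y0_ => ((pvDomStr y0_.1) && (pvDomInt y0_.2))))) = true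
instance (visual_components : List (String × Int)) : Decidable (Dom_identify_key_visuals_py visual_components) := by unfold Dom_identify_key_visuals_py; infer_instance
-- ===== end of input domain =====

-- B replaces A's two scans by one stable sort of the dict keys under a priority-rank dict (idiomatic; same result proved for all inputs).


-- ===== PORT A =====
def identify_key_visuals_py (visual_components : List (String × Int)) : List String :=
  let d := PySem.Dict.ofList visual_components
  let priority_visuals := ["cost_summary", "architecture_diagram", "specification_table", "timeline"]
  -- first loop: for visual in priority_visuals: if visual in visual_components: key_visuals.append(visual)
  let key_visuals := priority_visuals.foldl (fun acc v => if d.contains v then acc ++ [v] else acc) []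
  -- second loop: for visual in visual_components: if visual not in key_visuals: key_visuals.append(visual)
  let key_visuals := d.keys.foldl (fun acc v => if v ∈ acc then acc else acc ++ [v]) key_visuals
  PySem.List.slice key_visuals none (some 5)

-- ===== PORT B =====
def identify_key_visuals_py_alt (visual_components : List (String × Int)) : List String :=
  let priority_visuals := ["cost_summary", "architecture_diagram", "specification_table", "timeline"]
  -- rank = {name: i for i, name in enumerate(priority_visuals)}
  let rank : PySem.Dict String Int :=
    (PySem.List.enumerate priority_visuals).foldl (fun d p => d.insert p.2 p.1) PySem.Dict.empty
  -- sorted(visual_components, key=lambda v: rank.get(v, len(priority_visuals)))[:5]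
  PySem.List.slice
    (PySem.List.sorted (PySem.Dict.ofList visual_components).keys
      (fun v => rank.getD v ((priority_visuals.length : Nat) : Int)) false)
    none (some 5)

-- ===== PRECONDITION & SPEC =====
def Spec_identify_key_visuals_py (visual_components : List (String × Int)) (out : List String) : Prop := out = identify_key_visuals_py_alt visual_components
instance (visual_components : List (String × Int)) (out : List String) : Decidable (Spec_identify_key_visuals_py visual_components out) := by unfold Spec_identify_key_visuals_py; infer_instance

-- ===== CLAIM (what is proved, stated in full; the proofs are below) =====
def Claim_equal_identify_key_visuals_py : Prop := ∀ (visual_components : List (String × Int)), Dom_identify_key_visuals_py visual_components → Spec_identify_key_visuals_py visual_components (identify_key_visuals_py visual_components)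

-- ===== LEMMAS AND PROOFS =====

-- the priority list and the rank function rank.get(v, 4) of B, named for the proofs
def pvPrio : List String := ["cost_summary", "architecture_diagram", "specification_table", "timeline"]

def pvRnk (v : String) : Int :=
  if v = "cost_summary" then 0
  else if v = "architecture_diagram" then 1
  else if v = "specification_table" then 2
  else if v = "timeline" then 3 else 4

-- the common target shape: present priority names in priority order, then the other keys in order
def pvTgt (u : List String) : List String :=
  pvPrio.filter (fun p => decide (p ∈ u)) ++ u.filter (fun k => decide (k ∉ pvPrio))

theorem pvRnk_le (v : String) : pvRnk v ≤ 4 := by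
  unfold pvRnk; split_ifs <;> omega

theorem pvRnk_of_not_mem (v : String) (h : v ∉ pvPrio) : pvRnk v = 4 := by
  simp [pvPrio] at h
  simp [pvRnk, h.1, h.2.1, h.2.2.1, h.2.2.2]

theorem pv_rank_getD (v : String) :
    (((PySem.List.enumerate pvPrio).foldl (fun d p => d.insert p.2 p.1) PySem.Dict.empty).getD v ((pvPrio.length : Nat) : Int)) = pvRnk v := by
  simp [pvPrio, PySem.List.enumerate, List.foldl, PySem.Dict.getD_insert, PySem.Dict.getD_empty]
  unfold pvRnk
  split_ifs <;> simp_all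

theorem pv_insertBy_all_before {bf : String → String → Bool} {x : String} {ys : List String}
    (h : ∀ y ∈ ys, bf x y = true) : PySem.List.insertBy bf x ys = x :: ys := by
  cases ys with
  | nil => rfl
  | cons y t => simp [PySem.List.insertBy, h y (by simp)]

theorem pv_insertBy_append_not_before {bf : String → String → Bool} {x : String} {zs ys : List String}
    (h : ∀ z ∈ zs, bf x z = false) : PySem.List.insertBy bf x (zs ++ ys) = zs ++ PySem.List.insertBy bf x ys := by
  induction zs with
  | nil => rfl
  | cons z t ih =>
      simp only [List.cons_append, PySem.List.insertBy, h z (by simp)]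
      simp only [Bool.false_eq_true, if_false]
      rw [ih (fun z hz => h z (by simp [hz]))]

-- A's second loop over Nodup keys appends exactly the keys not already collected
theorem pv_loop2 (l : List String) (hl : l.Nodup) :
    ∀ acc : List String, l.foldl (fun acc v => if v ∈ acc then acc else acc ++ [v]) acc
      = acc ++ l.filter (fun v => decide (v ∉ acc)) := by
  induction l with
  | nil => intro acc; simp
  | cons k ks ih =>
      intro acc
      rcases List.nodup_cons.mp hl with ⟨hk, hks⟩
      by_cases hmem : k ∈ acc
      · simp [hmem, ih hks acc]
      · simp [hmem, ih hks (acc ++ [k])]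
        apply List.filter_congr
        intro x hx
        have hxk : x ≠ k := fun h => hk (h ▸ hx)
        simp [hxk]

theorem pvRnk_lt_four_of_mem {v : String} (h : v ∈ pvPrio) : pvRnk v < 4 := by
  simp [pvPrio] at h
  rcases h with rfl | rfl | rfl | rfl <;> decide

-- one insertion-sort step on the target shape, for a priority name k = pvPrio[i], pre/post the rest of pvPrio
theorem pv_step_prio (u : List String) (k : String) (hk : k ∉ u)
    (pre post : List String) (hsplit : pvPrio = pre ++ [k] ++ post)
    (hprek : k ∉ pre) (hpostk : k ∉ post)
    (hpre : ∀ z ∈ pre, ¬ pvRnk k < pvRnk z)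
    (hpost : ∀ z ∈ post, pvRnk k < pvRnk z) :
    PySem.List.insertBy (fun a b => decide (pvRnk a < pvRnk b)) k (pvTgt u) = pvTgt (u ++ [k]) := by
  have hkp : k ∈ pvPrio := by rw [hsplit]; simp
  have hk4 : pvRnk k < 4 := pvRnk_lt_four_of_mem hkp
  unfold pvTgt
  rw [hsplit]
  have h1 : ([k].filter (fun p => decide (p ∈ u))) = [] := by simp [hk]
  have h2 : ([k].filter (fun p => decide (p ∈ u ++ [k]))) = [k] := by simp
  have hQpre : pre.filter (fun p => decide (p ∈ u ++ [k])) = pre.filter (fun p => decide (p ∈ u)) := by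
    apply List.filter_congr
    intro z hz
    have hzk : z ≠ k := fun h => hprek (h ▸ hz)
    simp [hzk]
  have hQpost : post.filter (fun p => decide (p ∈ u ++ [k])) = post.filter (fun p => decide (p ∈ u)) := by
    apply List.filter_congr
    intro z hz
    have hzk : z ≠ k := fun h => hpostk (h ▸ hz)
    simp [hzk]
  simp only [List.filter_append, h1, h2, hQpre, hQpost, List.nil_append,
    List.append_assoc]
  rw [pv_insertBy_append_not_before (fun z hz => by
    have hz' : z ∈ pre := (List.mem_filter.mp hz).1
    simpa using hpre z hz')]
  rw [pv_insertBy_all_before (fun y hy => by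
    rcases List.mem_append.mp hy with hy1 | hy2
    · have hy' : y ∈ post := (List.mem_filter.mp hy1).1
      simpa using hpost y hy'
    · have hy' : y ∉ pvPrio := by
        have := (List.mem_filter.mp hy2).2
        rw [hsplit]
        simpa using this
      have h4 := pvRnk_of_not_mem y hy'
      simp [h4]
      omega)]
  simp

theorem pv_step (u : List String) (k : String) (hk : k ∉ u) :
    PySem.List.insertBy (fun a b => decide (pvRnk a < pvRnk b)) k (pvTgt u) = pvTgt (u ++ [k]) := by
  by_cases hkp : k ∈ pvPrio
  · simp only [pvPrio, List.mem_cons, List.not_mem_nil, or_false] at hkp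
    rcases hkp with rfl | rfl | rfl | rfl
    · exact pv_step_prio u _ hk [] ["architecture_diagram", "specification_table", "timeline"]
        rfl (by decide) (by decide) (by decide) (by decide)
    · exact pv_step_prio u _ hk ["cost_summary"] ["specification_table", "timeline"]
        rfl (by decide) (by decide) (by decide) (by decide)
    · exact pv_step_prio u _ hk ["cost_summary", "architecture_diagram"] ["timeline"]
        rfl (by decide) (by decide) (by decide) (by decide)
    · exact pv_step_prio u _ hk ["cost_summary", "architecture_diagram", "specification_table"] []
        rfl (by decide) (by decide) (by decide) (by decide)
  · have h4 := pvRnk_of_not_mem k hkp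
    have hall : ∀ y ∈ pvTgt u, (fun a b => decide (pvRnk a < pvRnk b)) k y = false := by
      intro y hy
      simp only [h4, decide_eq_false_iff_not, not_lt]
      exact pvRnk_le y
    rw [PySem.List.insertBy_of_forall_not_before _ _ _ hall]
    unfold pvTgt
    have h1 : pvPrio.filter (fun p => decide (p ∈ u ++ [k])) = pvPrio.filter (fun p => decide (p ∈ u)) := by
      apply List.filter_congr
      intro p hp
      have hpk : p ≠ k := fun h => hkp (h ▸ hp)
      simp [hpk]
    rw [h1, List.filter_append]
    simp [hkp]

-- the insertion-sort loop keeps the target shape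
theorem pv_sort_aux (rest : List String) : ∀ (u : List String), (u ++ rest).Nodup →
    rest.foldl (fun acc x => PySem.List.insertBy (fun a b => decide (pvRnk a < pvRnk b)) x acc) (pvTgt u)
      = pvTgt (u ++ rest) := by
  induction rest with
  | nil => intro u h; simp
  | cons k ks ih =>
      intro u h
      have hk : k ∉ u := by
        rw [List.nodup_append] at h
        intro hku
        exact h.2.2 k hku k (by simp) rfl
      have h' : ((u ++ [k]) ++ ks).Nodup := by simpa [List.append_assoc] using h
      simp only [List.foldl_cons]
      rw [pv_step u k hk, ih (u ++ [k]) h']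
      have : (u ++ [k]) ++ ks = u ++ k :: ks := by simp
      rw [this]

-- B's sort produces the target shape on Nodup keys
theorem pv_sorted (l : List String) (hl : l.Nodup) :
    PySem.List.sorted l pvRnk false = pvTgt l := by
  rw [PySem.List.sorted_eq_foldl_insertBy]
  have h := pv_sort_aux l [] (by simpa using hl)
  simpa [pvTgt, pvPrio] using h

-- A's port computes slice (pvTgt keys) [:5]
theorem pv_a_eq (vc : List (String × Int)) :
    identify_key_visuals_py vc = PySem.List.slice (pvTgt (PySem.Dict.ofList vc).keys) none (some 5) := by
  have hnd := PySem.Dict.nodup_keys_ofList vc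
  show PySem.List.slice
      ((PySem.Dict.ofList vc).keys.foldl (fun acc v => if v ∈ acc then acc else acc ++ [v])
        (pvPrio.foldl (fun acc v => if (PySem.Dict.ofList vc).contains v then acc ++ [v] else acc) []))
      none (some 5) = _
  rw [PySem.List.foldl_append_if_eq_filter (fun v => (PySem.Dict.ofList vc).contains v) pvPrio []]
  rw [pv_loop2 _ hnd]
  simp only [List.nil_append]
  unfold pvTgt
  have hP : pvPrio.filter (fun v => (PySem.Dict.ofList vc).contains v)
      = pvPrio.filter (fun p => decide (p ∈ (PySem.Dict.ofList vc).keys)) :=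
    List.filter_congr (fun p _ => PySem.Dict.contains_eq_decide_mem_keys _ p)
  rw [hP]
  refine congrArg (fun l => PySem.List.slice
    (List.filter (fun p => decide (p ∈ (PySem.Dict.ofList vc).keys)) pvPrio ++ l) none (some 5)) ?_
  apply List.filter_congr
  intro v hv
  simp [List.mem_filter, hv]

-- B's port computes slice (sorted keys by pvRnk) [:5]
theorem pv_b_eq (vc : List (String × Int)) :
    identify_key_visuals_py_alt vc
      = PySem.List.slice (PySem.List.sorted (PySem.Dict.ofList vc).keys pvRnk false) none (some 5) := by
  have hkey : (fun v => (((PySem.List.enumerate pvPrio).foldl (fun d p => d.insert p.2 p.1)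
      PySem.Dict.empty).getD v ((pvPrio.length : Nat) : Int))) = pvRnk := funext pv_rank_getD
  show PySem.List.slice
      (PySem.List.sorted (PySem.Dict.ofList vc).keys
        (fun v => (((PySem.List.enumerate pvPrio).foldl (fun d p => d.insert p.2 p.1)
          PySem.Dict.empty).getD v ((pvPrio.length : Nat) : Int))) false)
      none (some 5) = _
  rw [hkey]

-- ===== VERDICT (by name: the statement is the Claim_ definition above) =====
theorem identify_key_visuals_py_spec : Claim_equal_identify_key_visuals_py := by
  intro vc _
  unfold Spec_identify_key_visuals_py
  rw [pv_a_eq, pv_b_eq, pv_sorted _ (PySem.Dict.nodup_keys_ofList vc)]
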